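-- pv_equiv track=rewrite | github.com/contrapuntal/chat-template-patches | tests/test_render.py | _gap_after_last_tool_response
-- ===== SOURCE A (Python) =====
-- def _gap_after_last_tool_response(out: str) -> str:
--     """Return the substring between the LAST `<tool_response|>` and the
--     NEXT `<|turn>` opener that follows it. The G7 bug manifests as
--     *missing* `<turn|>` in this gap.
--     """
--     end_close = "<tool_response|>"
--     end_idx = out.rfind(end_close)
--     if end_idx < 0:
--         return ""  # caller can pytest.skip
--     after = out[end_idx + len(end_close) :]
--     # Find the next turn opener.
--     next_idx_user = after.find("<|turn>user")
--     next_idx_model = after.find("<|turn>model")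
--     candidates = [i for i in (next_idx_user, next_idx_model) if i >= 0]
--     if not candidates:
--         return after  # everything after the tool_response is the "gap"
--     return after[: min(candidates)]
-- ===== SOURCE B (Python) =====
-- def _gap_after_last_tool_response(out: str) -> str:
--     """Single left-to-right scan for the first turn opener instead of two
--     independent find() passes combined by min()."""
--     end_close = "<tool_response|>"
--     end_idx = out.rfind(end_close)
--     if end_idx < 0:
--         return ""
--     after = out[end_idx + len(end_close):]
--     for i in range(len(after)):
--         if after.startswith("<|turn>user", i) or after.startswith("<|turn>model", i):
--             return after[:i]
--     return after
-- ===== Notes on version B (the rewrite author's own statement) =====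
-- stated objective: alternative
-- what changed: Replaces A's two independent find() scans for the user/model openers, the candidate list, and min() with a single left-to-right scan that stops at the first position where either opener starts.
import Mathlib
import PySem

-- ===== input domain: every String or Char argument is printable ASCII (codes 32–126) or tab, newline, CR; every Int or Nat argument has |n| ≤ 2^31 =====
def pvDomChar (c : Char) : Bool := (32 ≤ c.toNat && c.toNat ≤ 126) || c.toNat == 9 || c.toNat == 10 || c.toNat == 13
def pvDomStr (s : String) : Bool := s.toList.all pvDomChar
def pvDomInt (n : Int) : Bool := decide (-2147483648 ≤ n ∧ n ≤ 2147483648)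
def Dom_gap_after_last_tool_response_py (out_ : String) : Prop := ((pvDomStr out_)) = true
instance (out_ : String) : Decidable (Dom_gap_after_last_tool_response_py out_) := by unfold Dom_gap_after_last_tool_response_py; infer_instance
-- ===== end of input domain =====

-- B replaces A's two independent find() passes combined by min() with one
-- left-to-right scan for the first turn opener (objective: alternative, same cost).

-- ===== PORT A =====
def gap_after_last_tool_response_py (out_ : String) : String :=
  let end_close := "<tool_response|>"
  let end_idx := PySem.Str.rfind out_ end_close
  if end_idx < 0 then ""
  else
    let after := PySem.Str.slice out_ (some (end_idx + PySem.Str.len end_close)) none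
    let next_idx_user := PySem.Str.find after "<|turn>user"
    let next_idx_model := PySem.Str.find after "<|turn>model"
    let candidates := [next_idx_user, next_idx_model].filter (fun i => decide (0 ≤ i))
    if candidates.isEmpty then after
    else PySem.Str.slice after none (some ((PySem.List.min? candidates (fun i => i)).getD 0))

-- ===== PORT B =====
-- the scan 'for i in range(len(after)): if after.startswith(u, i) or after.startswith(m, i): return after[:i]'
def pvScan (u m : List Char) : List Char → Nat → Option Nat
  | [], _ => none
  | c :: rest, i =>
    if PySem.Chars.startswith (c :: rest) u || PySem.Chars.startswith (c :: rest) m then some i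
    else pvScan u m rest (i + 1)

def gap_after_last_tool_response_py_alt (out_ : String) : String :=
  let end_close := "<tool_response|>"
  let end_idx := PySem.Str.rfind out_ end_close
  if end_idx < 0 then ""
  else
    let after := PySem.Str.slice out_ (some (end_idx + PySem.Str.len end_close)) none
    match pvScan "<|turn>user".toList "<|turn>model".toList after.toList 0 with
    | some i => PySem.Str.slice after none (some (i : Int))
    | none => after

-- ===== PRECONDITION & SPEC =====
def Spec_gap_after_last_tool_response_py (out_ : String) (out : String) : Prop := out = gap_after_last_tool_response_py_alt out_
instance (out_ : String) (out : String) : Decidable (Spec_gap_after_last_tool_response_py out_ out) := by unfold Spec_gap_after_last_tool_response_py; infer_instance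

-- ===== CLAIM =====
def Claim_equal_gap_after_last_tool_response_py : Prop := ∀ (out_ : String), Dom_gap_after_last_tool_response_py out_ → Spec_gap_after_last_tool_response_py out_ (gap_after_last_tool_response_py out_)

-- ===== LEMMAS AND PROOFS =====

-- prefix at an offset is an infix of the whole list
theorem pvInfix_of_prefix_drop {u t : List Char} {k : Nat} (h : u <+: t.drop k) : u <:+: t :=
  h.isInfix.trans (t.drop_suffix k).isInfix

-- find = -1 means no occurrence at any offset
theorem pvNoPrefix_of_find_neg (t p : List Char) (h : PySem.Chars.find t p = -1) :
    ∀ l, ¬ p <+: t.drop l := by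
  intro l hp
  exact ((PySem.Chars.find_eq_neg_one_iff t p).mp h) (pvInfix_of_prefix_drop hp)

theorem pvScan_none (u m : List Char) (hu : u ≠ []) (hm : m ≠ []) :
    ∀ (s : List Char) (i : Nat), pvScan u m s i = none →
      ∀ l, ¬ u <+: s.drop l ∧ ¬ m <+: s.drop l := by
  intro s
  induction s with
  | nil =>
    intro i _ l
    simp only [List.drop_nil]
    constructor <;> intro hp <;> [exact hu (List.prefix_nil.mp hp); exact hm (List.prefix_nil.mp hp)]
  | cons c rest ih =>
    intro i hscan l
    unfold pvScan at hscan
    by_cases hcond : (PySem.Chars.startswith (c :: rest) u || PySem.Chars.startswith (c :: rest) m) = true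
    · simp [hcond] at hscan
    · simp only [hcond] at hscan
      simp only [Bool.or_eq_true, not_or, Bool.not_eq_true] at hcond
      match l with
      | 0 =>
        simp only [List.drop_zero]
        constructor <;> intro hp
        · exact absurd ((PySem.Chars.startswith_iff _ _).mpr hp) (by simp [hcond.1])
        · exact absurd ((PySem.Chars.startswith_iff _ _).mpr hp) (by simp [hcond.2])
      | l' + 1 =>
        simpa using ih (i + 1) (by simpa using hscan) l'

theorem pvScan_some (u m : List Char) :
    ∀ (s : List Char) (i j : Nat), pvScan u m s i = some j →
      i ≤ j ∧ (u <+: s.drop (j - i) ∨ m <+: s.drop (j - i)) ∧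
        ∀ l, l < j - i → ¬ u <+: s.drop l ∧ ¬ m <+: s.drop l := by
  intro s
  induction s with
  | nil => intro i j h; simp [pvScan] at h
  | cons c rest ih =>
    intro i j hscan
    unfold pvScan at hscan
    by_cases hcond : (PySem.Chars.startswith (c :: rest) u || PySem.Chars.startswith (c :: rest) m) = true
    · simp only [hcond, if_true, Option.some.injEq] at hscan
      subst hscan
      refine ⟨le_refl _, ?_, ?_⟩
      · simp only [Nat.sub_self, List.drop_zero]
        rcases Bool.or_eq_true_iff.mp hcond with h | h
        · exact Or.inl ((PySem.Chars.startswith_iff _ _).mp h)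
        · exact Or.inr ((PySem.Chars.startswith_iff _ _).mp h)
      · intro l hl; omega
    · simp only [hcond] at hscan
      obtain ⟨hij, hP, hmin⟩ := ih (i + 1) j (by simpa using hscan)
      simp only [Bool.or_eq_true, not_or, Bool.not_eq_true] at hcond
      refine ⟨by omega, ?_, ?_⟩
      · have : j - i = (j - (i + 1)) + 1 := by omega
        rw [this]; simpa using hP
      · intro l hl
        match l with
        | 0 =>
          simp only [List.drop_zero]
          constructor <;> intro hp
          · exact absurd ((PySem.Chars.startswith_iff _ _).mpr hp) (by simp [hcond.1])
          · exact absurd ((PySem.Chars.startswith_iff _ _).mpr hp) (by simp [hcond.2])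
        | l' + 1 =>
          simpa using hmin l' (by omega)

-- the scan returns exactly the least position where either opener starts
theorem pvScan_eq_some (u m : List Char) (hu : u ≠ []) (hm : m ≠ []) (s : List Char) (j : Nat)
    (hP : u <+: s.drop j ∨ m <+: s.drop j)
    (hmin : ∀ l, l < j → ¬ u <+: s.drop l ∧ ¬ m <+: s.drop l) :
    pvScan u m s 0 = some j := by
  cases hres : pvScan u m s 0 with
  | none =>
    rcases hP with hp | hp
    · exact absurd hp (pvScan_none u m hu hm s 0 hres j).1
    · exact absurd hp (pvScan_none u m hu hm s 0 hres j).2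
  | some j' =>
    obtain ⟨_, hP', hmin'⟩ := pvScan_some u m s 0 j' hres
    simp only [Nat.sub_zero] at hP' hmin'
    congr 1
    by_contra hne
    rcases Nat.lt_or_ge j' j with hlt | hge
    · rcases hP' with hp | hp
      · exact (hmin j' hlt).1 hp
      · exact (hmin j' hlt).2 hp
    · have hlt : j < j' := by omega
      rcases hP with hp | hp
      · exact (hmin' j hlt).1 hp
      · exact (hmin' j hlt).2 hp

-- the core equivalence, on the string after the last tool_response close tag
theorem pvTail_eq (after : String) :
    (if ([PySem.Str.find after "<|turn>user", PySem.Str.find after "<|turn>model"].filter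
          (fun i => decide (0 ≤ i))).isEmpty then after
     else PySem.Str.slice after none
       (some ((PySem.List.min?
         ([PySem.Str.find after "<|turn>user", PySem.Str.find after "<|turn>model"].filter
           (fun i => decide (0 ≤ i))) (fun i => i)).getD 0)))
    = match pvScan "<|turn>user".toList "<|turn>model".toList after.toList 0 with
      | some i => PySem.Str.slice after none (some (i : Int))
      | none => after := by
  set t := after.toList with ht
  set u := "<|turn>user".toList with hUdef
  set m := "<|turn>model".toList with hMdef
  have hu : u ≠ [] := by decide
  have hm : m ≠ [] := by decide
  have hfu : PySem.Str.find after "<|turn>user" = PySem.Chars.find t u := by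
    simp [PySem.Str.find_eq, ht, hUdef]
  have hfm : PySem.Str.find after "<|turn>model" = PySem.Chars.find t m := by
    simp [PySem.Str.find_eq, ht, hMdef]
  set fu := PySem.Chars.find t u with hfudef
  set fm := PySem.Chars.find t m with hfmdef
  have hfu1 : -1 ≤ fu := PySem.Chars.neg_one_le_find t u
  have hfm1 : -1 ≤ fm := PySem.Chars.neg_one_le_find t m
  simp only [hfu, hfm]
  rcases (by omega : fu = -1 ∨ 0 ≤ fu) with hfuc | hfuc <;>
    rcases (by omega : fm = -1 ∨ 0 ≤ fm) with hfmc | hfmc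
  · -- neither opener occurs: both sides return after
    have hnone : pvScan u m t 0 = none := by
      cases hres : pvScan u m t 0 with
      | none => rfl
      | some j =>
        obtain ⟨_, hP, _⟩ := pvScan_some u m t 0 j hres
        simp only [Nat.sub_zero] at hP
        rcases hP with hp | hp
        · exact absurd (pvInfix_of_prefix_drop hp)
            ((PySem.Chars.find_eq_neg_one_iff t u).mp hfuc)
        · exact absurd (pvInfix_of_prefix_drop hp)
            ((PySem.Chars.find_eq_neg_one_iff t m).mp hfmc)
    simp [hfuc, hfmc, hnone]
  · -- only model occurs
    obtain ⟨hp, hleast⟩ := PySem.Chars.find_spec (sub := m) (s := t) (by omega)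
    have hscan : pvScan u m t 0 = some fm.toNat := by
      refine pvScan_eq_some u m hu hm t fm.toNat (Or.inr hp) ?_
      exact fun l hl => ⟨pvNoPrefix_of_find_neg t u hfuc l, hleast l hl⟩
    have h1 : ¬ (0 ≤ fu) := by omega
    simp [hfuc, hfmc, hscan, PySem.List.min?, Int.toNat_of_nonneg hfmc]
  · -- only user occurs
    obtain ⟨hp, hleast⟩ := PySem.Chars.find_spec (sub := u) (s := t) (by omega)
    have hscan : pvScan u m t 0 = some fu.toNat := by
      refine pvScan_eq_some u m hu hm t fu.toNat (Or.inl hp) ?_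
      exact fun l hl => ⟨hleast l hl, pvNoPrefix_of_find_neg t m hfmc l⟩
    have h1 : ¬ (0 ≤ fm) := by omega
    simp [hfuc, hfmc, hscan, PySem.List.min?, Int.toNat_of_nonneg hfuc]
  · -- both occur: the scan stops at the smaller index
    obtain ⟨hpu, hleastu⟩ := PySem.Chars.find_spec (sub := u) (s := t) (by omega)
    obtain ⟨hpm, hleastm⟩ := PySem.Chars.find_spec (sub := m) (s := t) (by omega)
    set j0 : Int := if fm < fu then fm else fu with hj0
    have hj0nn : 0 ≤ j0 := by rw [hj0]; split <;> omega
    have hscan : pvScan u m t 0 = some j0.toNat := by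
      refine pvScan_eq_some u m hu hm t j0.toNat ?_ ?_
      · rw [hj0]; split
        · exact Or.inr hpm
        · exact Or.inl hpu
      · intro l hl
        have hlu : l < fu.toNat := by rw [hj0] at hl; split at hl <;> omega
        have hlm : l < fm.toNat := by rw [hj0] at hl; split at hl <;> omega
        exact ⟨hleastu l hlu, hleastm l hlm⟩
    have hmins : PySem.List.min? [fu, fm] (fun i => i) = some (if fm < fu then fm else fu) := by
      simp only [PySem.List.min?, List.foldl]
      split <;> rfl
    simp only [hfuc, hfmc, decide_true, List.filter_cons, if_true, List.filter_nil,
      List.isEmpty_cons, Bool.false_eq_true, if_false, hscan, hmins, Option.getD_some]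
    rw [Int.toNat_of_nonneg hj0nn, hj0]

-- ===== VERDICT =====
theorem gap_after_last_tool_response_py_spec : Claim_equal_gap_after_last_tool_response_py := by
  intro out_ _
  unfold Spec_gap_after_last_tool_response_py
  by_cases h : PySem.Str.rfind out_ "<tool_response|>" < 0
  · simp only [gap_after_last_tool_response_py, gap_after_last_tool_response_py_alt, if_pos h]
  · simp only [gap_after_last_tool_response_py, gap_after_last_tool_response_py_alt, if_neg h]
    generalize PySem.Str.slice out_
      (some (PySem.Str.rfind out_ "<tool_response|>" + PySem.Str.len "<tool_response|>")) none = after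
    exact pvTail_eq after
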